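-- pv_equiv track=rewrite | github.com/DimaM315/visual_graph_of_the_function | mathCore/Sequenses.py | sequence_divisor_counter
-- ===== SOURCE A (Python) =====
-- def sequence_divisor_counter(last_x:int)->list:
-- 	# Последовательность из кол-ва делителей натуральных чисел.
-- 	# 1, 2, ... WIDTH_X_AXIC_PX
-- 	seq = [(1, 1), (2, 2)]
-- 	for n in range(3, last_x):
-- 		divisor_counter = 2
-- 		for i in range(2, n//2+1):
-- 			if n % i == 0:
-- 				divisor_counter += 1
-- 		element = (n, divisor_counter)
-- 		seq.append(element)
-- 	return seq
-- ===== SOURCE B (Python) =====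
-- def sequence_divisor_counter(last_x: int) -> list:
--     # Divisor-count sieve: every d increments the count of each of its multiples.
--     counts = {}
--     for d in range(1, last_x):
--         for m in range(d, last_x, d):
--             counts[m] = counts.get(m, 0) + 1
--     seq = [(1, 1), (2, 2)]
--     for n in range(3, last_x):
--         seq.append((n, counts.get(n, 0)))
--     return seq
-- ===== Notes on version B (the rewrite author's own statement) =====
-- stated objective: faster
-- what changed: Replaces A's per-number trial-division inner loop with a divisor sieve: one dict of counts is built by iterating each d over its multiples, then the sequence is read off the dict.
import Mathlib
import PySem

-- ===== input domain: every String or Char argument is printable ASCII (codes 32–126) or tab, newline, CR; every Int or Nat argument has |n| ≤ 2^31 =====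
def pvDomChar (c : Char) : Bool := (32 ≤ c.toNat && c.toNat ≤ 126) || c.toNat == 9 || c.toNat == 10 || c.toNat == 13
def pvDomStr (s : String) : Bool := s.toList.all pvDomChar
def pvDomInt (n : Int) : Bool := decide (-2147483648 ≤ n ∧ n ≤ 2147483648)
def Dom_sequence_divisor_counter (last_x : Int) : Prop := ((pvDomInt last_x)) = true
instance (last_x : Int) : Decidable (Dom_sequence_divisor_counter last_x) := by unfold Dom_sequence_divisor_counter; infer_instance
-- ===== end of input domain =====

-- B replaces A's per-number trial-division inner loop (O(n^2) total) with a divisor sieve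
-- that increments a counter of every multiple of every d (O(n log n)); objective: faster.

-- ===== PORT A =====
def sequence_divisor_counter (last_x : Int) : List (Int × Int) :=
  (PySem.List.pyRange 3 last_x 1).foldl
    (fun seq n =>
      let divisor_counter : Int :=
        (PySem.List.pyRange 2 (PySem.Int.floordiv n 2 + 1) 1).foldl
          (fun c i => if PySem.Int.mod n i == 0 then c + 1 else c) 2
      let element := (n, divisor_counter)
      seq ++ [element])
    [(1, 1), (2, 2)]

-- ===== PORT B =====
def sequence_divisor_counter_alt (last_x : Int) : List (Int × Int) :=
  let counts : PySem.Dict Int Int :=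
    (PySem.List.pyRange 1 last_x 1).foldl
      (fun counts d =>
        (PySem.List.pyRange d last_x d).foldl
          (fun counts m => counts.insert m (counts.getD m 0 + 1)) counts)
      PySem.Dict.empty
  (PySem.List.pyRange 3 last_x 1).foldl
    (fun seq n => seq ++ [(n, counts.getD n 0)]) [(1, 1), (2, 2)]

-- ===== PRECONDITION & SPEC =====
def Spec_sequence_divisor_counter (last_x : Int) (out : List (Int × Int)) : Prop := out = sequence_divisor_counter_alt last_x
instance (last_x : Int) (out : List (Int × Int)) : Decidable (Spec_sequence_divisor_counter last_x out) := by unfold Spec_sequence_divisor_counter; infer_instance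

-- ===== CLAIM (what is proved, stated in full; the proofs are below) =====
def Claim_equal_sequence_divisor_counter : Prop := ∀ (last_x : Int), Dom_sequence_divisor_counter last_x → Spec_sequence_divisor_counter last_x (sequence_divisor_counter last_x)

-- ===== LEMMAS AND PROOFS =====

-- a nested fold over an outer list of inner lists is a fold over their concatenation
theorem pv_foldl_foldl_flat {α β : Type} (l : List α) (g : α → List β)
    (step : PySem.Dict Int Int → β → PySem.Dict Int Int) (init : PySem.Dict Int Int) :
    l.foldl (fun acc d => (g d).foldl step acc) init = (l.flatMap g).foldl step init := by
  induction l generalizing init with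
  | nil => rfl
  | cons x xs ih => simp [List.flatMap_cons, List.foldl_append, ih]

theorem pv_nodup_pyRange_pos (a b : Int) {s : Int} (hs : 0 < s) :
    (PySem.List.pyRange a b s).Nodup := by
  rw [PySem.List.pyRange_of_pos a b hs]
  refine List.Nodup.map ?_ List.nodup_range
  intro i j h
  have h' : s * (i : Int) = s * (j : Int) := by
    have h2 := add_left_cancel h
    exact h2
  have := mul_left_cancel₀ (ne_of_gt hs) h'
  exact_mod_cast this

theorem pv_count_pyRange_pos (a b n : Int) {s : Int} (hs : 0 < s) :
    (PySem.List.pyRange a b s).count n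
      = if n ∈ PySem.List.pyRange a b s then 1 else 0 := by
  split_ifs with h
  · exact List.count_eq_one_of_mem (pv_nodup_pyRange_pos a b hs) h
  · exact List.count_eq_zero_of_not_mem h

-- a 0/1 indicator sum over a list is a countP (Nat-valued form)
theorem pv_sum_ite {α : Type} (p : α → Bool) (l : List α) :
    (l.map (fun d => if p d = true then (1 : Nat) else 0)).sum = l.countP p := by
  induction l with
  | nil => simp
  | cons x xs ih =>
    by_cases h : p x
    · simp [h, ih]
      omega
    · simp [h, ih]

-- the sieve's dictionary at key n holds the number of sampled divisors of n
theorem pv_sieve_getD (last_x n : Int) :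
    ((PySem.List.pyRange 1 last_x 1).foldl
      (fun counts d =>
        (PySem.List.pyRange d last_x d).foldl
          (fun counts m => counts.insert m (counts.getD m 0 + 1)) counts)
      PySem.Dict.empty).getD n 0
    = ((PySem.List.pyRange 1 last_x 1).countP
        (fun d => decide (n ∈ PySem.List.pyRange d last_x d)) : Int) := by
  rw [pv_foldl_foldl_flat, PySem.Dict.getD_foldl_insert_add_one, PySem.Dict.getD_empty,
      List.count_flatMap]
  have hm : (PySem.List.pyRange 1 last_x 1).map
        (List.count n ∘ fun d => PySem.List.pyRange d last_x d)
      = (PySem.List.pyRange 1 last_x 1).map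
          (fun d => if decide (n ∈ PySem.List.pyRange d last_x d) = true then 1 else 0) := by
    apply List.map_congr_left
    intro d hd
    rw [PySem.List.mem_pyRange_one] at hd
    simp only [Function.comp_apply, decide_eq_true_eq]
    exact pv_count_pyRange_pos d last_x n (by omega)
  rw [hm, pv_sum_ite]
  omega

-- a positive d "hits" n in the sieve iff d is a divisor of n not exceeding it (and n < last_x)
theorem pv_mem_sieve_row (d last_x n : Int) (hd : 0 < d) :
    n ∈ PySem.List.pyRange d last_x d ↔ d ≤ n ∧ n < last_x ∧ d ∣ n := by
  rw [PySem.List.mem_pyRange_iff_of_pos hd]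
  constructor
  · rintro ⟨h1, h2, h3⟩
    refine ⟨h1, h2, ?_⟩
    have := dvd_add h3 (dvd_refl d)
    simpa using this
  · rintro ⟨h1, h2, h3⟩
    exact ⟨h1, h2, dvd_sub h3 dvd_rfl⟩

-- a proper divisor of n is at most n // 2
theorem pv_divisor_le_half (d n : Int) (hd : 0 < d) (hdn : d < n) (hdvd : d ∣ n) :
    d ≤ n / 2 := by
  obtain ⟨k, hk⟩ := hdvd
  have hk2 : 2 ≤ k := by nlinarith
  have : 2 * d ≤ n := by nlinarith
  omega

-- the sieve count of n equals 2 plus A's trial-division count, for 3 ≤ n < last_x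
theorem pv_count_eq (last_x n : Int) (hn : 3 ≤ n) (hlt : n < last_x) :
    ((PySem.List.pyRange 1 last_x 1).countP
        (fun d => decide (n ∈ PySem.List.pyRange d last_x d)))
    = 2 + (PySem.List.pyRange 2 (PySem.Int.floordiv n 2 + 1) 1).countP
        (fun i => PySem.Int.mod n i == 0) := by
  have hfd : PySem.Int.floordiv n 2 = n / 2 := PySem.Int.floordiv_eq_ediv_of_pos (by omega)
  have h2 : (1 : Int) ≤ n / 2 := by omega
  have hhalf : n / 2 + 1 ≤ n := by omega
  rw [hfd]
  rw [PySem.List.pyRange_one_append 1 2 last_x (by omega) (by omega),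
      PySem.List.pyRange_one_append 2 (n / 2 + 1) last_x (by omega) (by omega),
      PySem.List.pyRange_one_append (n / 2 + 1) n last_x (by omega) (by omega),
      PySem.List.pyRange_one_append n (n + 1) last_x (by omega) (by omega)]
  simp only [List.countP_append]
  have c1 : (PySem.List.pyRange 1 2 1).countP
      (fun d => decide (n ∈ PySem.List.pyRange d last_x d)) = 1 := by
    rw [show (2 : Int) = 1 + 1 from by norm_num, PySem.List.pyRange_one_singleton]
    simp [pv_mem_sieve_row 1 last_x n (by norm_num), hlt]
    omega
  have c2 : (PySem.List.pyRange 2 (n / 2 + 1) 1).countP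
      (fun d => decide (n ∈ PySem.List.pyRange d last_x d))
      = (PySem.List.pyRange 2 (n / 2 + 1) 1).countP (fun i => PySem.Int.mod n i == 0) := by
    apply List.countP_congr
    intro d hd
    rw [PySem.List.mem_pyRange_one] at hd
    have hd0 : 0 < d := by omega
    have hdn : d ≤ n := by omega
    simp [pv_mem_sieve_row d last_x n hd0, hdn, hlt, PySem.Int.mod_eq_zero_iff_dvd]
  have c3 : (PySem.List.pyRange (n / 2 + 1) n 1).countP
      (fun d => decide (n ∈ PySem.List.pyRange d last_x d)) = 0 := by
    rw [List.countP_eq_zero]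
    intro d hd
    rw [PySem.List.mem_pyRange_one] at hd
    simp only [decide_eq_true_eq, pv_mem_sieve_row d last_x n (by omega)]
    rintro ⟨-, -, hdvd⟩
    have := pv_divisor_le_half d n (by omega) (by omega) hdvd
    omega
  have c4 : (PySem.List.pyRange n (n + 1) 1).countP
      (fun d => decide (n ∈ PySem.List.pyRange d last_x d)) = 1 := by
    rw [PySem.List.pyRange_one_singleton]
    simp [pv_mem_sieve_row n last_x n (by omega), hlt]
  have c5 : (PySem.List.pyRange (n + 1) last_x 1).countP
      (fun d => decide (n ∈ PySem.List.pyRange d last_x d)) = 0 := by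
    rw [List.countP_eq_zero]
    intro d hd
    rw [PySem.List.mem_pyRange_one] at hd
    simp only [decide_eq_true_eq, pv_mem_sieve_row d last_x n (by omega)]
    omega
  rw [c1, c2, c3, c4, c5]
  omega

-- ===== VERDICT (by name: the statement is the Claim_ definition above) =====
theorem sequence_divisor_counter_spec : Claim_equal_sequence_divisor_counter := by
  intro last_x _
  unfold Spec_sequence_divisor_counter sequence_divisor_counter sequence_divisor_counter_alt
  simp only [PySem.List.foldl_count_if]
  rw [PySem.List.foldl_append_singleton_eq_map, PySem.List.foldl_append_singleton_eq_map]
  congr 1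
  apply List.map_congr_left
  intro n hn
  rw [PySem.List.mem_pyRange_one] at hn
  rw [pv_sieve_getD, pv_count_eq last_x n (by omega) (by omega)]
  push_cast
  ring
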